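-- pv_equiv track=rewrite | github.com/bermudi/password-strength.py | password-strength.py | leet_speak_penalty
-- ===== SOURCE A (Python) =====
-- def leet_speak_penalty(password):
--     """Calculate penalty for using l33t speak patterns."""
--     # Convert the password to lowercase for case-insensitive checks
--     password_lower = password.lower()
--
--     # Common l33t speak substitutions
--     leet_substitutions = {
--         '4': 'a',
--         '3': 'e',
--         '1': 'i',
--         '0': 'o',
--         '7': 't',
--         '$': 's',
--         '5': 's'
--     }
--
--     penalty = 0
--     for leet_char, alpha_char in leet_substitutions.items():
--         if leet_char in password_lower:
--             penalty += 15  # Penalty for each detected l33t speak pattern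
--
--     return penalty
-- ===== SOURCE B (Python) =====
-- LEET_BIT = {'4': 1, '3': 2, '1': 4, '0': 8, '7': 16, '$': 32, '5': 64}
--
--
-- def leet_speak_penalty(password):
--     """Calculate penalty for using l33t speak patterns."""
--     mask = 0
--     for ch in password.lower():
--         mask |= LEET_BIT.get(ch, 0)
--     penalty = 0
--     while mask:            # count set bits (Kernighan)
--         penalty += 15
--         mask &= mask - 1
--     return penalty
-- ===== Notes on version B (the rewrite author's own statement) =====
-- stated objective: alternative
-- what changed: Replaces A's seven per-key substring scans and running penalty sum by a single pass over the password that ORs per-character bit flags from a char-to-bit dict into a 7-bit mask, then converts the mask to the penalty by counting its set bits with Kernighan's bit-clearing loop.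
import Mathlib
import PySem

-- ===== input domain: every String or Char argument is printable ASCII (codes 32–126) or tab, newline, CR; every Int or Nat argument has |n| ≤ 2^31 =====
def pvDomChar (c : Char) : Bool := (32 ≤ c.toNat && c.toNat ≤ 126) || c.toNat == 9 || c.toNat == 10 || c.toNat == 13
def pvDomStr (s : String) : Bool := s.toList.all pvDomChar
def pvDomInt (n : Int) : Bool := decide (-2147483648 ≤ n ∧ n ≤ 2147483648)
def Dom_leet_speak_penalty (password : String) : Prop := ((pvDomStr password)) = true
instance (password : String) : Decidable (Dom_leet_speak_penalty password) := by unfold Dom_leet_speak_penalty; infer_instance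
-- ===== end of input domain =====

-- B replaces A's seven per-key substring scans by one pass over the password that ORs
-- per-character bit flags into a 7-bit mask, then counts the set bits (Kernighan) ('alternative').

-- ===== PORT A =====
def leetSubstitutions : PySem.Dict String String :=
  PySem.Dict.ofList [("4","a"),("3","e"),("1","i"),("0","o"),("7","t"),("$","s"),("5","s")]

def leet_speak_penalty (password : String) : Int :=
  let password_lower := PySem.Str.lower password
  leetSubstitutions.items.foldl
    (fun penalty kv => if PySem.Str.isIn kv.1 password_lower then penalty + 15 else penalty) 0

-- ===== PORT B =====
-- mask stays a natural number: every Python int this code manipulates is nonnegative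
def leetBit : PySem.Dict Char Nat :=
  PySem.Dict.ofList [('4',1),('3',2),('1',4),('0',8),('7',16),('$',32),('5',64)]

-- the 'while mask:' loop of Source B; fuel = initial mask bounds the iterations (mask strictly decreases)
def popLoop : Nat → Nat → Int → Int
  | 0, _, p => p
  | fuel+1, m, p => if m = 0 then p else popLoop fuel (m &&& (m-1)) (p + 15)

def leet_speak_penalty_alt (password : String) : Int :=
  let mask := (PySem.Str.lower password).toList.foldl (fun m ch => m ||| leetBit.getD ch 0) 0
  popLoop mask mask 0

-- ===== PRECONDITION & SPEC =====
def Spec_leet_speak_penalty (password : String) (out : Int) : Prop := out = leet_speak_penalty_alt password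
instance (password : String) (out : Int) : Decidable (Spec_leet_speak_penalty password out) := by unfold Spec_leet_speak_penalty; infer_instance

-- ===== CLAIM (what is proved, stated in full; the proofs are below) =====
def Claim_equal_leet_speak_penalty : Prop := ∀ (password : String), Dom_leet_speak_penalty password → Spec_leet_speak_penalty password (leet_speak_penalty password)

-- ===== LEMMAS AND PROOFS =====

-- A's loop over the key/value pairs is 15 times the number of keys whose check fires.
lemma foldA_eq (l : List (String × String)) (pl : String) (acc : Int) :
    l.foldl (fun penalty kv => if PySem.Str.isIn kv.1 pl then penalty + 15 else penalty) acc
      = acc + 15 * (l.countP (fun kv => PySem.Str.isIn kv.1 pl)) := by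
  induction l generalizing acc with
  | nil => simp
  | cons kv rest ih =>
    rw [List.foldl_cons, List.countP_cons]
    cases hb : PySem.Str.isIn kv.1 pl with
    | true =>
      simp only [if_true, ih]
      push_cast
      ring
    | false =>
      simp only [Bool.false_eq_true, if_false, ih, add_zero]

-- a one-character substring test is character membership
lemma charsIsIn_singleton (c : Char) (l : List Char) :
    PySem.Chars.isIn [c] l = decide (c ∈ l) := by
  rw [Bool.eq_iff_iff]
  simp [PySem.Chars.isIn_iff_infix, List.singleton_infix_iff]

-- the literal bit dictionary, as a conditional
lemma leetBit_getD (c : Char) : leetBit.getD c 0 =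
    if c = '4' then 1 else if c = '3' then 2 else if c = '1' then 4 else if c = '0' then 8
    else if c = '7' then 16 else if c = '$' then 32 else if c = '5' then 64 else 0 := by
  by_cases h4 : c = '4'
  · subst h4; decide
  by_cases h3 : c = '3'
  · subst h3; decide
  by_cases h1 : c = '1'
  · subst h1; decide
  by_cases h0 : c = '0'
  · subst h0; decide
  by_cases h7 : c = '7'
  · subst h7; decide
  by_cases hd : c = '$'
  · subst hd; decide
  by_cases h5 : c = '5'
  · subst h5; decide
  · have h : leetBit = PySem.Dict.mk [('4',1),('3',2),('1',4),('0',8),('7',16),('$',32),('5',64)] := by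
      decide
    simp only [if_neg h4, if_neg h3, if_neg h1, if_neg h0, if_neg h7, if_neg hd, if_neg h5,
      h, PySem.Dict.getD_eq_get?_getD, PySem.Dict.get?_mk_cons,
      beq_iff_eq, if_neg (Ne.symm h4), if_neg (Ne.symm h3), if_neg (Ne.symm h1),
      if_neg (Ne.symm h0), if_neg (Ne.symm h7), if_neg (Ne.symm hd), if_neg (Ne.symm h5)]
    rfl

def fmask (b0 b1 b2 b3 b4 b5 b6 : Bool) : Nat :=
  (if b0 then 1 else 0) ||| (if b1 then 2 else 0) ||| (if b2 then 4 else 0) |||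
  (if b3 then 8 else 0) ||| (if b4 then 16 else 0) ||| (if b5 then 32 else 0) |||
  (if b6 then 64 else 0)

-- ORing one key's bit into the flag word sets that flag
lemma orb0 : ∀ b0 b1 b2 b3 b4 b5 b6 : Bool, 1 ||| fmask b0 b1 b2 b3 b4 b5 b6
    = fmask true b1 b2 b3 b4 b5 b6 := by decide
lemma orb1 : ∀ b0 b1 b2 b3 b4 b5 b6 : Bool, 2 ||| fmask b0 b1 b2 b3 b4 b5 b6
    = fmask b0 true b2 b3 b4 b5 b6 := by decide
lemma orb2 : ∀ b0 b1 b2 b3 b4 b5 b6 : Bool, 4 ||| fmask b0 b1 b2 b3 b4 b5 b6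
    = fmask b0 b1 true b3 b4 b5 b6 := by decide
lemma orb3 : ∀ b0 b1 b2 b3 b4 b5 b6 : Bool, 8 ||| fmask b0 b1 b2 b3 b4 b5 b6
    = fmask b0 b1 b2 true b4 b5 b6 := by decide
lemma orb4 : ∀ b0 b1 b2 b3 b4 b5 b6 : Bool, 16 ||| fmask b0 b1 b2 b3 b4 b5 b6
    = fmask b0 b1 b2 b3 true b5 b6 := by decide
lemma orb5 : ∀ b0 b1 b2 b3 b4 b5 b6 : Bool, 32 ||| fmask b0 b1 b2 b3 b4 b5 b6
    = fmask b0 b1 b2 b3 b4 true b6 := by decide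
lemma orb6 : ∀ b0 b1 b2 b3 b4 b5 b6 : Bool, 64 ||| fmask b0 b1 b2 b3 b4 b5 b6
    = fmask b0 b1 b2 b3 b4 b5 true := by decide

-- membership in a cons cell, on the decide level
lemma dec_mem_self (c : Char) (cs : List Char) : decide (c ∈ c :: cs) = true := by simp

lemma dec_mem_ne (k c : Char) (cs : List Char) (h : k ≠ c) :
    decide (k ∈ c :: cs) = decide (k ∈ cs) := by simp [List.mem_cons, h]

-- pulling a fixed OR-term out of the mask fold
lemma foldl_or_init (cs : List Char) (a x : Nat) :
    cs.foldl (fun m c => m ||| leetBit.getD c 0) (a ||| x)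
      = a ||| cs.foldl (fun m c => m ||| leetBit.getD c 0) x := by
  induction cs generalizing x with
  | nil => rfl
  | cons c cs ih => simp only [List.foldl_cons, Nat.or_assoc, ih]

-- the mask fold computes exactly the bit flags of the seven keys' membership
lemma mask_eq (cs : List Char) :
    cs.foldl (fun m c => m ||| leetBit.getD c 0) 0
      = fmask (decide ('4' ∈ cs)) (decide ('3' ∈ cs)) (decide ('1' ∈ cs))
          (decide ('0' ∈ cs)) (decide ('7' ∈ cs)) (decide ('$' ∈ cs)) (decide ('5' ∈ cs)) := by
  induction cs with
  | nil => decide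
  | cons c cs ih =>
    have step : (c :: cs).foldl (fun m c => m ||| leetBit.getD c 0) 0
        = leetBit.getD c 0 ||| cs.foldl (fun m c => m ||| leetBit.getD c 0) 0 := by
      rw [List.foldl_cons]
      have h0 : (0 : Nat) ||| leetBit.getD c 0 = leetBit.getD c 0 ||| 0 := by
        simp [Nat.zero_or, Nat.or_zero]
      rw [h0, foldl_or_init]
    rw [step, ih]
    by_cases h0 : c = '4'
    · subst h0
      rw [show leetBit.getD '4' 0 = 1 from by decide, dec_mem_self,
          dec_mem_ne '3' '4' cs (by decide),
          dec_mem_ne '1' '4' cs (by decide),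
          dec_mem_ne '0' '4' cs (by decide),
          dec_mem_ne '7' '4' cs (by decide),
          dec_mem_ne '$' '4' cs (by decide),
          dec_mem_ne '5' '4' cs (by decide)]
      exact orb0 _ _ _ _ _ _ _
    by_cases h1 : c = '3'
    · subst h1
      rw [show leetBit.getD '3' 0 = 2 from by decide, dec_mem_self,
          dec_mem_ne '4' '3' cs (by decide),
          dec_mem_ne '1' '3' cs (by decide),
          dec_mem_ne '0' '3' cs (by decide),
          dec_mem_ne '7' '3' cs (by decide),
          dec_mem_ne '$' '3' cs (by decide),
          dec_mem_ne '5' '3' cs (by decide)]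
      exact orb1 _ _ _ _ _ _ _
    by_cases h2 : c = '1'
    · subst h2
      rw [show leetBit.getD '1' 0 = 4 from by decide, dec_mem_self,
          dec_mem_ne '4' '1' cs (by decide),
          dec_mem_ne '3' '1' cs (by decide),
          dec_mem_ne '0' '1' cs (by decide),
          dec_mem_ne '7' '1' cs (by decide),
          dec_mem_ne '$' '1' cs (by decide),
          dec_mem_ne '5' '1' cs (by decide)]
      exact orb2 _ _ _ _ _ _ _
    by_cases h3 : c = '0'
    · subst h3
      rw [show leetBit.getD '0' 0 = 8 from by decide, dec_mem_self,
          dec_mem_ne '4' '0' cs (by decide),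
          dec_mem_ne '3' '0' cs (by decide),
          dec_mem_ne '1' '0' cs (by decide),
          dec_mem_ne '7' '0' cs (by decide),
          dec_mem_ne '$' '0' cs (by decide),
          dec_mem_ne '5' '0' cs (by decide)]
      exact orb3 _ _ _ _ _ _ _
    by_cases h4 : c = '7'
    · subst h4
      rw [show leetBit.getD '7' 0 = 16 from by decide, dec_mem_self,
          dec_mem_ne '4' '7' cs (by decide),
          dec_mem_ne '3' '7' cs (by decide),
          dec_mem_ne '1' '7' cs (by decide),
          dec_mem_ne '0' '7' cs (by decide),
          dec_mem_ne '$' '7' cs (by decide),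
          dec_mem_ne '5' '7' cs (by decide)]
      exact orb4 _ _ _ _ _ _ _
    by_cases h5 : c = '$'
    · subst h5
      rw [show leetBit.getD '$' 0 = 32 from by decide, dec_mem_self,
          dec_mem_ne '4' '$' cs (by decide),
          dec_mem_ne '3' '$' cs (by decide),
          dec_mem_ne '1' '$' cs (by decide),
          dec_mem_ne '0' '$' cs (by decide),
          dec_mem_ne '7' '$' cs (by decide),
          dec_mem_ne '5' '$' cs (by decide)]
      exact orb5 _ _ _ _ _ _ _
    by_cases h6 : c = '5'
    · subst h6
      rw [show leetBit.getD '5' 0 = 64 from by decide, dec_mem_self,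
          dec_mem_ne '4' '5' cs (by decide),
          dec_mem_ne '3' '5' cs (by decide),
          dec_mem_ne '1' '5' cs (by decide),
          dec_mem_ne '0' '5' cs (by decide),
          dec_mem_ne '7' '5' cs (by decide),
          dec_mem_ne '$' '5' cs (by decide)]
      exact orb6 _ _ _ _ _ _ _
    · rw [leetBit_getD, if_neg h0, if_neg h1, if_neg h2, if_neg h3, if_neg h4, if_neg h5,
        if_neg h6, Nat.zero_or,
        dec_mem_ne '4' c cs (fun h => h0 h.symm), dec_mem_ne '3' c cs (fun h => h1 h.symm),
        dec_mem_ne '1' c cs (fun h => h2 h.symm), dec_mem_ne '0' c cs (fun h => h3 h.symm),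
        dec_mem_ne '7' c cs (fun h => h4 h.symm), dec_mem_ne '$' c cs (fun h => h5 h.symm),
        dec_mem_ne '5' c cs (fun h => h6 h.symm)]

-- the Kernighan loop on a 7-bit flag word is 15 per set flag
lemma popLoop_fmask : ∀ b0 b1 b2 b3 b4 b5 b6 : Bool,
    popLoop (fmask b0 b1 b2 b3 b4 b5 b6) (fmask b0 b1 b2 b3 b4 b5 b6) 0
      = 15 * (((if b0 then 1 else 0) + (if b1 then 1 else 0) + (if b2 then 1 else 0)
          + (if b3 then 1 else 0) + (if b4 then 1 else 0) + (if b5 then 1 else 0)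
          + (if b6 then 1 else 0) : Int)) := by
  decide

-- ===== VERDICT (by name: the statement is the Claim_ definition above) =====
theorem leet_speak_penalty_spec : Claim_equal_leet_speak_penalty := by
  intro password _
  unfold Spec_leet_speak_penalty leet_speak_penalty leet_speak_penalty_alt
  set pl := PySem.Str.lower password with hpl
  have hitems : leetSubstitutions.items
      = [("4","a"),("3","e"),("1","i"),("0","o"),("7","t"),("$","s"),("5","s")] := by decide
  rw [hitems, foldA_eq]
  have hkeys : ∀ (c : Char) (s : String), s.toList = [c] →
      PySem.Str.isIn s pl = decide (c ∈ pl.toList) := by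
    intro c s hs
    simp [PySem.Str.isIn, hs, charsIsIn_singleton]
  simp only [List.countP_cons, List.countP_nil]
  rw [hkeys '4' "4" rfl, hkeys '3' "3" rfl, hkeys '1' "1" rfl, hkeys '0' "0" rfl,
      hkeys '7' "7" rfl, hkeys '$' "$" rfl, hkeys '5' "5" rfl]
  rw [mask_eq, popLoop_fmask]
  generalize (decide ('4' ∈ pl.toList)) = b0
  generalize (decide ('3' ∈ pl.toList)) = b1
  generalize (decide ('1' ∈ pl.toList)) = b2
  generalize (decide ('0' ∈ pl.toList)) = b3
  generalize (decide ('7' ∈ pl.toList)) = b4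
  generalize (decide ('$' ∈ pl.toList)) = b5
  generalize (decide ('5' ∈ pl.toList)) = b6
  revert b0 b1 b2 b3 b4 b5 b6
  decide
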